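-- pv_equiv track=rewrite | github.com/hannakathryn/590-HKB9 | HW5.0/01-clean.py | form_dictionary
-- ===== SOURCE A (Python) =====
-- def form_dictionary(samples):
--     token_index = {};
--     #FORM DICTIONARY WITH WORD INDICE MAPPINGS
--     for sample in samples:
--         for word in sample.split():
--             if word not in token_index:
--                 token_index[word] = len(token_index) + 1
--
--     transformed_text=list()
--     for sample in samples:
--         tmp=list()
--         for word in sample.split():
--             tmp.append(token_index[word])
--         transformed_text.append(tmp)
--
--     return [token_index,transformed_text]
-- ===== SOURCE B (Python) =====
-- def form_dictionary(samples):
--     token_index = {}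
--     transformed_text = []
--     for sample in samples:
--         tmp = []
--         for word in sample.split():
--             idx = token_index.get(word)
--             if idx is None:
--                 idx = len(token_index) + 1
--                 token_index[word] = idx
--             tmp.append(idx)
--         transformed_text.append(tmp)
--     return [token_index, transformed_text]
-- ===== Notes on version B (the rewrite author's own statement) =====
-- stated objective: alternative
-- what changed: Fuses A's two passes over samples into a single pass that both extends the word-index dict and emits each sample's index list, splitting each sample once and probing the dict once per word instead of A's separate build and lookup loops.
import Mathlib
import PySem

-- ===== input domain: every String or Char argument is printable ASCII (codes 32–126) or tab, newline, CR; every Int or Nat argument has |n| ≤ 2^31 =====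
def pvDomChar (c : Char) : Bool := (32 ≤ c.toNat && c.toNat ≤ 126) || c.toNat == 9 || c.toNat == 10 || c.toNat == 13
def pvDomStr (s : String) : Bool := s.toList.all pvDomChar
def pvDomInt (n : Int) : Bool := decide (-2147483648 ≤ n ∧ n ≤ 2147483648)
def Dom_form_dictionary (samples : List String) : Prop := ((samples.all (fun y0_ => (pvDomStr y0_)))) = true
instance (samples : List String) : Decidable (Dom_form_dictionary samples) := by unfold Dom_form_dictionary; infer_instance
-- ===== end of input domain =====

-- B fuses A's two passes over `samples` into one pass that grows the dict and emits each
-- sample's index list together (one split and one dict probe per word); return value unchanged.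

-- ===== PORT A =====
-- inner body of A's first loop: `if word not in token_index: token_index[word] = len(token_index)+1`
def fdAddWord (d : PySem.Dict String Int) (word : String) : PySem.Dict String Int :=
  if d.contains word = false then d.insert word ((d.size : Int) + 1) else d

def form_dictionary (samples : List String) : (List (String × Int)) × List (List Int) :=
  let token_index :=
    samples.foldl (fun d sample => (PySem.Str.split₀ sample).foldl fdAddWord d) PySem.Dict.empty
  -- `token_index[word]` can never miss here (every word was inserted in the first pass),
  -- so `(get? …).getD 0` is exact
  let transformed_text :=
    samples.foldl (fun tt sample =>
      tt ++ [(PySem.Str.split₀ sample).foldl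
               (fun tmp word => tmp ++ [(token_index.get? word).getD 0]) []]) []
  (token_index.items, transformed_text)

-- ===== PORT B =====
-- B's inner loop body: probe once; on a miss, insert with index len+1 and append that index
def fdStepB (p : PySem.Dict String Int × List Int) (word : String) :
    PySem.Dict String Int × List Int :=
  match p.1.get? word with
  | some i => (p.1, p.2 ++ [i])
  | none => (p.1.insert word ((p.1.size : Int) + 1), p.2 ++ [((p.1.size : Int) + 1)])

-- B's outer loop body: one sample → extended dict and its index list appended
def fdStepSample (st : PySem.Dict String Int × List (List Int)) (sample : String) :
    PySem.Dict String Int × List (List Int) :=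
  let r := (PySem.Str.split₀ sample).foldl fdStepB (st.1, ([] : List Int))
  (r.1, st.2 ++ [r.2])

def form_dictionary_alt (samples : List String) : (List (String × Int)) × List (List Int) :=
  let r := samples.foldl fdStepSample (PySem.Dict.empty, [])
  (r.1.items, r.2)

-- ===== PRECONDITION & SPEC =====
def Spec_form_dictionary (samples : List String) (out : (List (String × Int)) × List (List Int)) : Prop := out = form_dictionary_alt samples
instance (samples : List String) (out : (List (String × Int)) × List (List Int)) : Decidable (Spec_form_dictionary samples out) := by unfold Spec_form_dictionary; infer_instance

-- ===== CLAIM (what is proved, stated in full; the proofs are below) =====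
def Claim_equal_form_dictionary : Prop := ∀ (samples : List String), Dom_form_dictionary samples → Spec_form_dictionary samples (form_dictionary samples)

-- ===== LEMMAS AND PROOFS =====

-- dict after A's first pass, as folds over words / samples
def fdBuildW (d : PySem.Dict String Int) (ws : List String) : PySem.Dict String Int :=
  ws.foldl fdAddWord d

def fdBuildAll (d : PySem.Dict String Int) (ss : List String) : PySem.Dict String Int :=
  ss.foldl (fun d sample => (PySem.Str.split₀ sample).foldl fdAddWord d) d

theorem fdAddWord_mono {d : PySem.Dict String Int} {k : String} {v : Int} (w : String)
    (h : d.get? k = some v) : (fdAddWord d w).get? k = some v := by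
  unfold fdAddWord
  split_ifs with hc
  · have hwk : k ≠ w := by
      intro he; subst he
      rw [PySem.Dict.contains_eq_isSome_get?, h] at hc; simp at hc
    rw [PySem.Dict.get?_insert]; simp [hwk, h]
  · exact h

theorem fdBuildW_mono {d : PySem.Dict String Int} {k : String} {v : Int} (ws : List String)
    (h : d.get? k = some v) : (fdBuildW d ws).get? k = some v := by
  induction ws generalizing d with
  | nil => exact h
  | cons w rest ih => exact ih (fdAddWord_mono w h)

theorem fdBuildAll_mono {d : PySem.Dict String Int} {k : String} {v : Int} (ss : List String)
    (h : d.get? k = some v) : (fdBuildAll d ss).get? k = some v := by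
  induction ss generalizing d with
  | nil => exact h
  | cons s rest ih => exact ih (fdBuildW_mono _ h)

-- B's inner fold computes A's dict extension and the lookups in any dict D preserving it
theorem fdInner_eq (ws : List String) (d : PySem.Dict String Int) (tmp : List Int)
    (D : PySem.Dict String Int)
    (hD : ∀ k v, (fdBuildW d ws).get? k = some v → D.get? k = some v) :
    ws.foldl fdStepB (d, tmp)
      = (fdBuildW d ws, tmp ++ ws.map (fun w => (D.get? w).getD 0)) := by
  induction ws generalizing d tmp with
  | nil => simp [fdBuildW]
  | cons w rest ih =>
    have hstep : fdBuildW d (w :: rest) = fdBuildW (fdAddWord d w) rest := rfl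
    cases hg : d.get? w with
    | some i =>
      have hc : d.contains w = true := by
        rw [PySem.Dict.contains_eq_isSome_get?, hg]; rfl
      have hA : fdAddWord d w = d := by unfold fdAddWord; simp [hc]
      have hDw : D.get? w = some i := by
        apply hD; rw [hstep, hA]; exact fdBuildW_mono rest hg
      have : List.foldl fdStepB (d, tmp) (w :: rest)
          = List.foldl fdStepB (d, tmp ++ [i]) rest := by
        simp [List.foldl_cons, fdStepB, hg]
      rw [this, ih d (tmp ++ [i]) (by rw [← hA, ← hstep]; exact hD)]
      simp [hstep, hA, hDw]
    | none =>
      have hc : d.contains w = false := by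
        rw [PySem.Dict.contains_eq_isSome_get?, hg]; rfl
      have hA : fdAddWord d w = d.insert w ((d.size : Int) + 1) := by
        unfold fdAddWord; simp [hc]
      have hDw : D.get? w = some ((d.size : Int) + 1) := by
        apply hD; rw [hstep]
        exact fdBuildW_mono rest (by rw [hA]; exact PySem.Dict.get?_insert_self _ _ _)
      have : List.foldl fdStepB (d, tmp) (w :: rest)
          = List.foldl fdStepB (fdAddWord d w, tmp ++ [((d.size : Int) + 1)]) rest := by
        simp [List.foldl_cons, fdStepB, hg, hA]
      rw [this, ih (fdAddWord d w) _ (by rw [← hstep]; exact hD), ← hstep]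
      simp [hDw]

-- B's outer fold computes A's full dict and the per-sample lookup lists in D
theorem fdOuter_eq (ss : List String) (d : PySem.Dict String Int) (acc : List (List Int))
    (D : PySem.Dict String Int)
    (hD : ∀ k v, (fdBuildAll d ss).get? k = some v → D.get? k = some v) :
    ss.foldl fdStepSample (d, acc)
      = (fdBuildAll d ss,
         acc ++ ss.map (fun s => (PySem.Str.split₀ s).map (fun w => (D.get? w).getD 0))) := by
  induction ss generalizing d acc with
  | nil => simp [fdBuildAll]
  | cons s rest ih =>
    have hstep : fdBuildAll d (s :: rest) = fdBuildAll (fdBuildW d (PySem.Str.split₀ s)) rest := rfl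
    have hDs : ∀ k v, (fdBuildW d (PySem.Str.split₀ s)).get? k = some v → D.get? k = some v := by
      intro k v h; exact hD k v (by rw [hstep]; exact fdBuildAll_mono rest h)
    have hinner := fdInner_eq (PySem.Str.split₀ s) d [] D hDs
    have : List.foldl fdStepSample (d, acc) (s :: rest)
        = List.foldl fdStepSample
            (fdBuildW d (PySem.Str.split₀ s),
             acc ++ [(PySem.Str.split₀ s).map (fun w => (D.get? w).getD 0)]) rest := by
      simp [List.foldl_cons, fdStepSample, hinner]
    rw [this, ih _ _ (by rw [← hstep]; exact hD), ← hstep]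
    simp

-- A's append-one-element folds are maps
theorem foldl_append_singleton {α β : Type} (f : α → β) (l : List α) (acc : List β) :
    l.foldl (fun acc x => acc ++ [f x]) acc = acc ++ l.map f := by
  induction l generalizing acc with
  | nil => simp
  | cons x rest ih => simp [List.foldl_cons, ih]

-- ===== VERDICT (by name: the statement is the Claim_ definition above) =====
theorem form_dictionary_spec : Claim_equal_form_dictionary := by
  intro samples _
  unfold Spec_form_dictionary form_dictionary form_dictionary_alt
  have hd : samples.foldl (fun d sample => (PySem.Str.split₀ sample).foldl fdAddWord d)
      PySem.Dict.empty = fdBuildAll PySem.Dict.empty samples := rfl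
  rw [fdOuter_eq samples PySem.Dict.empty [] (fdBuildAll PySem.Dict.empty samples)
      (fun _ _ h => h)]
  simp only [hd]
  congr 1
  have hin : ∀ s : String, (PySem.Str.split₀ s).foldl
      (fun tmp word => tmp ++ [((fdBuildAll PySem.Dict.empty samples).get? word).getD 0]) []
      = (PySem.Str.split₀ s).map
          (fun w => ((fdBuildAll PySem.Dict.empty samples).get? w).getD 0) := by
    intro s; rw [foldl_append_singleton]; simp
  rw [foldl_append_singleton
        (fun sample => (PySem.Str.split₀ sample).foldl
          (fun tmp word => tmp ++ [((fdBuildAll PySem.Dict.empty samples).get? word).getD 0]) [])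
        samples []]
  simp [hin]
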